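-- pv_equiv track=rewrite | github.com/mmagdiel/devs_in_training_2022 | problems/problem_04.py | sum_multiples_of_three
-- ===== SOURCE A (Python) =====
-- def sum_multiples_of_three(number):
--  rest= []
--  if number == str(number):
--      return 0
--  elif number < 0:
--        suma = number *-1
--        for n in range(0,suma+1):
--         if n % 3 == 0:
--          rest.append(n)
--         fin = sum(rest)
--        return(fin *-1)
--  elif number>0:
--   for n in range(0,number+1):
--    if n % 3 == 0:
--     rest.append(n)
--   fin = sum(rest)
--   return(fin)
-- ===== SOURCE B (Python) =====
-- def sum_multiples_of_three(number):
--     k = abs(number) // 3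
--     s = 3 * k * (k + 1) // 2
--     return -s if number < 0 else s
-- ===== Notes on version B (the rewrite author's own statement) =====
-- stated objective: faster
-- what changed: Replaces the O(n) loop that appends each multiple of three and sums the list with the closed-form arithmetic-series formula 3*k*(k+1)//2 for k = |n|//3, negated for negative input.
-- outside the precondition, e.g. on sum_multiples_of_three(0): A returns None, B returns 0
import Mathlib
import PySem

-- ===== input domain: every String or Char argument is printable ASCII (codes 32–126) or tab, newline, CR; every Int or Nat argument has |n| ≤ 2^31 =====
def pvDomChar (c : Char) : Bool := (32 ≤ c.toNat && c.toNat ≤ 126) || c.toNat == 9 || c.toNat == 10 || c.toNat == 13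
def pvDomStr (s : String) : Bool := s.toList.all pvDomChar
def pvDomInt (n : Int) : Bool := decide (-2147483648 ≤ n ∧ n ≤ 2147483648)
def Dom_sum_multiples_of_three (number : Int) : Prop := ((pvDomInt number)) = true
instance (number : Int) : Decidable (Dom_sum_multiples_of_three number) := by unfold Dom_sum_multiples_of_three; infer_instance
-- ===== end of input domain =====

-- B replaces A's O(n) append-and-sum loop with the closed-form series 3*k*(k+1)//2, k = |n|//3.

-- ===== PORT A =====
-- 'number == str(number)' is always False for an int argument, so that branch is omitted.
-- 'fin = sum(rest)' (recomputed each iteration in the negative branch, once after the loop in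
-- the positive branch) equals sum(rest) after the loop, since range(0, suma+1) is never empty.
def sum_multiples_of_three (number : Int) : Int :=
  if number < 0 then
    let suma := number * -1
    let rest := (PySem.List.pyRange 0 (suma + 1) 1).foldl
      (fun acc n => if n % 3 == 0 then acc ++ [n] else acc) ([] : List Int)
    let fin := rest.sum
    fin * -1
  else if number > 0 then
    let rest := (PySem.List.pyRange 0 (number + 1) 1).foldl
      (fun acc n => if n % 3 == 0 then acc ++ [n] else acc) ([] : List Int)
    let fin := rest.sum
    fin
  else 0  -- number = 0: Python A returns None (no int); excluded by Pre_

-- ===== PORT B =====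
def sum_multiples_of_three_alt (number : Int) : Int :=
  let k := PySem.Int.floordiv |number| 3
  let s := PySem.Int.floordiv (3 * k * (k + 1)) 2
  if number < 0 then -s else s

-- ===== PRECONDITION & SPEC =====
-- Pre_ excludes number = 0, where A falls through all branches and returns None (not an int).
def Pre_sum_multiples_of_three (number : Int) : Prop := number ≠ 0
instance (number : Int) : Decidable (Pre_sum_multiples_of_three number) := by
  unfold Pre_sum_multiples_of_three; infer_instance
def pvWitness_sum_multiples_of_three : Int := 7

def Spec_sum_multiples_of_three (number : Int) (out : Int) : Prop := out = sum_multiples_of_three_alt number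
instance (number : Int) (out : Int) : Decidable (Spec_sum_multiples_of_three number out) := by unfold Spec_sum_multiples_of_three; infer_instance

-- ===== CLAIM (what is proved, stated in full; the proofs are below) =====
def Claim_equal_sum_multiples_of_three : Prop := ∀ (number : Int), Dom_sum_multiples_of_three number → Pre_sum_multiples_of_three number → Spec_sum_multiples_of_three number (sum_multiples_of_three number)

-- ===== LEMMAS AND PROOFS =====

-- the sum A's loop computes for the nonnegative bound m
def pvLoopSum (m : Nat) : Int :=
  ((PySem.List.pyRange 0 ((m : Int) + 1) 1).filter (fun n => n % 3 == 0)).sum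

theorem pvLoopSum_two_mul (m : Nat) :
    2 * pvLoopSum m = 3 * ((m / 3 : Nat) : Int) * (((m / 3 : Nat) : Int) + 1) := by
  induction m with
  | zero => decide
  | succ m ih =>
    have hsplit : PySem.List.pyRange 0 ((m : Int) + 1 + 1) 1
        = PySem.List.pyRange 0 ((m : Int) + 1) 1 ++ [(m : Int) + 1] := by
      exact PySem.List.pyRange_one_succ_right (by omega)
    have hstep : pvLoopSum (m + 1)
        = pvLoopSum m + (if ((m : Int) + 1) % 3 == 0 then (m : Int) + 1 else 0) := by
      unfold pvLoopSum
      push_cast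
      rw [hsplit, List.filter_append, List.sum_append]
      by_cases h : ((m : Int) + 1) % 3 == 0 <;> simp [h]
    have hmod : ((m : Int) + 1) % 3 = (((m + 1) % 3 : Nat) : Int) := by
      push_cast; omega
    by_cases h3 : (m + 1) % 3 = 0
    · obtain ⟨k, hm, hk, hq⟩ : ∃ k, m = 3 * k + 2 ∧ (m + 1) / 3 = k + 1 ∧ m / 3 = k :=
        ⟨m / 3, by omega, by omega, rfl⟩
      have hb : (((m : Int) + 1) % 3 == 0) = true := by
        rw [hmod, h3]; decide
      rw [hstep, hb, if_pos rfl, hk]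
      rw [hq] at ih
      have hm' : (m : Int) = 3 * (k : Int) + 2 := by exact_mod_cast hm
      push_cast
      linear_combination ih + 2 * hm'
    · have hk : (m + 1) / 3 = m / 3 := by omega
      have hb : (((m : Int) + 1) % 3 == 0) = false := by
        rw [hmod]
        simp only [beq_eq_false_iff_ne, ne_eq]
        exact_mod_cast h3
      rw [hstep, hb, if_neg (by simp), add_zero, hk, ih]

theorem pvLoopSum_closed (m : Nat) :
    pvLoopSum m = PySem.Int.floordiv (3 * ((m / 3 : Nat) : Int) * (((m / 3 : Nat) : Int) + 1)) 2 := by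
  have h := pvLoopSum_two_mul m
  symm
  apply (PySem.Int.floordiv_eq_iff_of_pos (by norm_num)).2
  constructor <;> omega

theorem pvFoldl_filter (l : List Int) :
    l.foldl (fun acc n => if n % 3 == 0 then acc ++ [n] else acc) ([] : List Int)
      = l.filter (fun n => n % 3 == 0) := by
  rw [PySem.List.foldl_append_if_eq_filter]
  simp

-- ===== VERDICT (by name: the statement is the Claim_ definition above) =====
theorem sum_multiples_of_three_spec : Claim_equal_sum_multiples_of_three := by
  intro number _ hpre
  unfold Spec_sum_multiples_of_three sum_multiples_of_three sum_multiples_of_three_alt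
  simp only [pvFoldl_filter]
  have habs : |number| = ((number.natAbs : Nat) : Int) := by
    exact_mod_cast (Int.abs_eq_natAbs number)
  have hk3 : PySem.Int.floordiv |number| 3 = ((number.natAbs / 3 : Nat) : Int) := by
    rw [habs]; exact_mod_cast PySem.Int.floordiv_natCast number.natAbs 3
  rw [hk3]
  have hclosed := pvLoopSum_closed number.natAbs
  unfold pvLoopSum at hclosed
  by_cases hneg : number < 0
  · have hsuma : number * -1 = ((number.natAbs : Nat) : Int) := by
      rw [Int.natCast_natAbs]; omega
    rw [if_pos hneg, if_pos hneg, hsuma, hclosed]; ring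
  · have hpos : number > 0 := lt_of_le_of_ne (not_lt.1 hneg) (Ne.symm hpre)
    have hnum : number = ((number.natAbs : Nat) : Int) := by
      rw [Int.natCast_natAbs]; omega
    rw [if_neg hneg, if_pos hpos, if_neg hneg, hnum, hclosed]; simp
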